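-- pv_equiv track=rewrite | github.com/MrBrantCode/unitest_baseline | mut_generate/mist_train_cf/cf_7777/solution.py | manipulate_list
-- ===== SOURCE A (Python) =====
-- def manipulate_list(lst):
--     # Create a new list by doubling every element in the original list
--     doubled_lst = [2*x for x in lst]
--
--     # Sort the new list using bubble sort algorithm
--     n = len(doubled_lst)
--     for i in range(n):
--         for j in range(0, n-i-1):
--             if doubled_lst[j] > doubled_lst[j+1]:
--                 doubled_lst[j], doubled_lst[j+1] = doubled_lst[j+1], doubled_lst[j]
--
--     return doubled_lst
-- ===== SOURCE B (Python) =====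
-- def manipulate_list(lst):
--     # Double every element, then sort with the built-in Timsort instead of bubble sort.
--     return sorted(2 * x for x in lst)
-- ===== Notes on version B (the rewrite author's own statement) =====
-- stated objective: faster
-- what changed: Replaces the hand-written index-swapping bubble sort with a single call to Python's built-in sorted (Timsort) over the doubled list.
import Mathlib
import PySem

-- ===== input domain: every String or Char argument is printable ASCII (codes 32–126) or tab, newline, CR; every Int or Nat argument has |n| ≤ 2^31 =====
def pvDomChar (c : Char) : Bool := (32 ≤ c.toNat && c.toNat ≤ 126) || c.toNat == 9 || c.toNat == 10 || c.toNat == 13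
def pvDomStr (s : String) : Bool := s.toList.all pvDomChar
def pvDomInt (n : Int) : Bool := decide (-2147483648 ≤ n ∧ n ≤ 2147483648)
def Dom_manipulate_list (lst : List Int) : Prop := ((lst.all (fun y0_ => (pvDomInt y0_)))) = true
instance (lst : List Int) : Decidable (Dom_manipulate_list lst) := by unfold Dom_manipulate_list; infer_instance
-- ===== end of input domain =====

-- B replaces A's hand-written index-swapping bubble sort with one call to Python's built-in sorted over the doubled list (faster).

-- ===== PORT A =====
-- Literal port of A: double every element, then bubble-sort with the two index loops.
-- The swap 'doubled_lst[j], doubled_lst[j+1] = doubled_lst[j+1], doubled_lst[j]' reads both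
-- cells first (a, b below), then assigns left to right; indices j and j+1 are always in
-- range (j < n-i-1 ≤ n-1), so the total forms pyGetD/pySetD are exact here.
def manipulate_list (lst : List Int) : List Int :=
  let doubled := lst.map (fun x => 2 * x)
  let n : Int := doubled.length
  (PySem.List.pyRange 0 n 1).foldl
    (fun l i =>
      (PySem.List.pyRange 0 (n - i - 1) 1).foldl
        (fun l' j =>
          if PySem.List.pyGetD l' j 0 > PySem.List.pyGetD l' (j + 1) 0 then
            let a := PySem.List.pyGetD l' (j + 1) 0
            let b := PySem.List.pyGetD l' j 0
            PySem.List.pySetD (PySem.List.pySetD l' j a) (j + 1) b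
          else l')
        l)
    doubled

-- ===== PORT B =====
-- Port of B: sorted(2*x for x in lst) — PySem.List.sorted is Python's sorted.
def manipulate_list_alt (lst : List Int) : List Int :=
  PySem.List.sorted (lst.map (fun x => 2 * x)) (fun x => x) false

-- ===== PRECONDITION & SPEC =====
def Spec_manipulate_list (lst : List Int) (out : List Int) : Prop := out = manipulate_list_alt lst
instance (lst : List Int) (out : List Int) : Decidable (Spec_manipulate_list lst out) := by unfold Spec_manipulate_list; infer_instance

-- ===== CLAIM (what is proved, stated in full; the proofs are below) =====
def Claim_equal_manipulate_list : Prop := ∀ (lst : List Int), Dom_manipulate_list lst → Spec_manipulate_list lst (manipulate_list lst)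

-- ===== LEMMAS AND PROOFS =====

-- Structural reformulation of A's loops (Nat indices, plain List.set/getD):
-- swapStep = the body of the inner loop, innerN = the inner loop, outerN = the outer loop.
def swapStep (l : List Int) (j : Nat) : List Int :=
  if l.getD (j + 1) 0 < l.getD j 0 then
    (l.set j (l.getD (j + 1) 0)).set (j + 1) (l.getD j 0)
  else l

def innerN (l : List Int) (m : Nat) : List Int :=
  (List.range m).foldl swapStep l

def outerN (d : List Int) : List Int :=
  (List.range d.length).foldl (fun l i => innerN l (d.length - i - 1)) d

-- getD-of-set glue (Mathlib states these through getElem?).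
theorem getD_set_ne (l : List Int) (i j : Nat) (a d : Int) (h : i ≠ j) :
    (l.set i a).getD j d = l.getD j d := by
  simp [List.getD_eq_getElem?_getD, List.getElem?_set_ne h]

theorem getD_set_self (l : List Int) (i : Nat) (a d : Int) (h : i < l.length) :
    (l.set i a).getD i d = a := by
  simp [List.getD_eq_getElem?_getD, List.getElem?_set_self h]

theorem length_swapStep (l : List Int) (j : Nat) : (swapStep l j).length = l.length := by
  unfold swapStep; split <;> simp

theorem length_innerN (l : List Int) (m : Nat) : (innerN l m).length = l.length := by
  unfold innerN
  induction m with
  | zero => simp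
  | succ m ih => rw [List.range_succ, List.foldl_append]; simp [length_swapStep, ih]

theorem innerN_succ (l : List Int) (m : Nat) :
    innerN l (m + 1) = swapStep (innerN l m) m := by
  unfold innerN; rw [List.range_succ, List.foldl_append]; rfl

theorem swapStep_cons (a : Int) (t : List Int) (j : Nat) :
    swapStep (a :: t) (j + 1) = a :: swapStep t j := by
  unfold swapStep
  simp only [List.getD_cons_succ, List.set_cons_succ]
  split <;> rfl

theorem perm_swapStep (l : List Int) (j : Nat) (h : j + 1 < l.length) :
    (swapStep l j).Perm l := by
  induction j generalizing l with
  | zero =>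
      match l, h with
      | a :: b :: t, _ =>
        unfold swapStep
        split
        · simpa using List.Perm.swap a b t
        · exact List.Perm.refl _
  | succ j ih =>
      match l, h with
      | a :: t, h =>
        rw [swapStep_cons]
        exact (ih t (by simpa using h)).cons a

theorem perm_innerN (l : List Int) (m : Nat) (hm : m < l.length) : (innerN l m).Perm l := by
  induction m with
  | zero => simp [innerN]
  | succ m ih =>
      rw [innerN_succ]
      have h1 : m < l.length := Nat.lt_of_succ_lt hm
      have h2 : m + 1 < (innerN l m).length := by rw [length_innerN]; exact hm
      exact (perm_swapStep _ m h2).trans (ih h1)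

theorem drop_swapStep (l : List Int) (j : Nat) :
    (swapStep l j).drop (j + 2) = l.drop (j + 2) := by
  unfold swapStep
  split
  · rw [List.drop_set_of_lt (by omega), List.drop_set_of_lt (by omega)]
  · rfl

theorem drop_innerN (l : List Int) (m : Nat) :
    (innerN l m).drop (m + 1) = l.drop (m + 1) := by
  induction m with
  | zero => simp [innerN]
  | succ m ih =>
      rw [innerN_succ, drop_swapStep]
      have h2 : ((innerN l m).drop (m + 1)).drop 1 = (l.drop (m + 1)).drop 1 := by rw [ih]
      rw [List.drop_drop, List.drop_drop] at h2
      exact h2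

-- After the inner loop up to m, position m holds a maximum of the first m+1 cells.
theorem max_innerN (l : List Int) (m : Nat) (hm : m < l.length) :
    ∀ i ≤ m, (innerN l m).getD i 0 ≤ (innerN l m).getD m 0 := by
  induction m with
  | zero => intro i hi; interval_cases i; exact le_refl _
  | succ m ih =>
      intro i hi
      rw [innerN_succ]
      have hLlen : (innerN l m).length = l.length := length_innerN l m
      set L := innerN l m with hL
      have hm1 : m + 1 < L.length := by rw [hLlen]; exact hm
      have hmL : m < L.length := by omega
      unfold swapStep
      split
      · rename_i c
        have htop : ((L.set m (L.getD (m + 1) 0)).set (m + 1) (L.getD m 0)).getD (m + 1) 0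
            = L.getD m 0 := getD_set_self _ _ _ _ (by simpa using hm1)
        rw [htop]
        rcases Nat.lt_or_ge i (m + 1) with hi' | hi'
        · rcases Nat.lt_or_ge i m with hi'' | hi''
          · rw [getD_set_ne _ _ _ _ _ (by omega), getD_set_ne _ _ _ _ _ (by omega)]
            exact ih (by omega) i (by omega)
          · have : i = m := by omega
            subst this
            rw [getD_set_ne _ _ _ _ _ (by omega), getD_set_self _ _ _ _ hmL]
            exact le_of_lt c
        · have : i = m + 1 := by omega
          subst this
          rw [htop]
      · rename_i c
        have c : L.getD m 0 ≤ L.getD (m + 1) 0 := not_lt.mp c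
        rcases Nat.lt_or_ge i (m + 1) with hi' | hi'
        · exact le_trans (ih (by omega) i (by omega)) c
        · have : i = m + 1 := by omega
          subst this
          exact le_refl _

-- Bubble sort's outer invariant: after passes leaving suffix length l.length - k settled,
-- the dropped suffix is sorted and dominates the prefix.
def InvP (k : Nat) (l : List Int) : Prop :=
  (l.drop k).Pairwise (· ≤ ·) ∧ ∀ x ∈ l.take k, ∀ y ∈ l.drop k, x ≤ y

theorem inv_step (k : Nat) (l : List Int) (hk : 1 ≤ k) (hk2 : k ≤ l.length)
    (h : InvP k l) : InvP (k - 1) (innerN l (k - 1)) := by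
  obtain ⟨hsort, hdom⟩ := h
  have hkl : k - 1 < l.length := by omega
  have hlen : (innerN l (k - 1)).length = l.length := length_innerN _ _
  set l' := innerN l (k - 1) with hl'
  have hdrop : l'.drop k = l.drop k := by
    have := drop_innerN l (k - 1)
    rwa [Nat.sub_add_cancel hk] at this
  have hperm : l'.Perm l := perm_innerN l (k - 1) hkl
  have htake : (l'.take k).Perm (l.take k) := by
    have h1 : (l'.take k ++ l'.drop k).Perm (l.take k ++ l.drop k) := by
      rw [List.take_append_drop, List.take_append_drop]; exact hperm
    rw [hdrop] at h1
    exact (List.perm_append_right_iff _).mp h1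
  have hk1 : k - 1 < l'.length := by omega
  have hmax : ∀ i ≤ k - 1, l'.getD i 0 ≤ l'.getD (k - 1) 0 :=
    max_innerN l (k - 1) hkl
  have hcons : l'.drop (k - 1) = l'[k - 1] :: l'.drop k := by
    have := List.drop_eq_getElem_cons hk1
    rwa [Nat.sub_add_cancel hk] at this
  have hmem : l'[k - 1] ∈ l.take k := by
    have : l'[k - 1] ∈ l'.take k := by
      have h1 : k - 1 < (l'.take k).length := by simp; omega
      have := List.getElem_take (xs := l') (i := k - 1) (j := k) (h := h1)
      exact this ▸ List.getElem_mem h1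
    exact htake.mem_iff.mp this
  have hheadle : ∀ y ∈ l.drop k, l'[k - 1] ≤ y := fun y hy => hdom _ hmem y hy
  constructor
  · rw [hcons, hdrop]
    exact List.Pairwise.cons hheadle hsort
  · intro x hx y hy
    rw [hcons, hdrop] at hy
    rcases List.mem_cons.mp hy with rfl | hy'
    · -- y is the bubbled-up maximum l'[k-1]; x sits at some index i < k-1
      obtain ⟨i, hilen, hieq⟩ := List.mem_iff_getElem.mp hx
      have hitk : i < k - 1 := by simp at hilen; omega
      have hi2 : i < l'.length := by omega
      have hxval : x = l'[i] := by
        rw [← hieq, List.getElem_take]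
      rw [hxval]
      have := hmax i (by omega)
      rwa [List.getD_eq_getElem _ _ hi2, List.getD_eq_getElem _ _ hk1] at this
    · have hx' : x ∈ l'.take k := List.take_subset_take_left l' (by omega) hx
      exact hdom x (htake.mem_iff.mp hx') y hy'

theorem outer_inv (d : List Int) : ∀ t, t ≤ d.length →
    InvP (d.length - t) ((List.range t).foldl (fun l i => innerN l (d.length - i - 1)) d) ∧
    ((List.range t).foldl (fun l i => innerN l (d.length - i - 1)) d).Perm d := by
  intro t
  induction t with
  | zero =>
      intro _
      refine ⟨⟨?_, ?_⟩, List.Perm.refl _⟩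
      · simp
      · intro x _ y hy; simp at hy
  | succ t ih =>
      intro ht
      have ht' : t ≤ d.length := by omega
      obtain ⟨hinv, hperm⟩ := ih ht'
      set L := (List.range t).foldl (fun l i => innerN l (d.length - i - 1)) d with hLdef
      have hLlen : L.length = d.length := hperm.length_eq
      rw [List.range_succ, List.foldl_append]
      simp only [List.foldl_cons, List.foldl_nil]
      have hk : 1 ≤ d.length - t := by omega
      have hk2 : d.length - t ≤ L.length := by omega
      have step := inv_step (d.length - t) L hk hk2 hinv
      constructor
      · have he : d.length - (t + 1) = d.length - t - 1 := by omega
        rw [he]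
        exact step
      · have hl : d.length - t - 1 < L.length := by omega
        exact (perm_innerN L _ hl).trans hperm

theorem perm_outerN (d : List Int) : (outerN d).Perm d :=
  (outer_inv d d.length (le_refl _)).2

theorem pairwise_outerN (d : List Int) : (outerN d).Pairwise (· ≤ ·) := by
  have := (outer_inv d d.length (le_refl _)).1.1
  simpa using this

-- Port A's PySem loops compute the structural bubble sort.
theorem inner_bridge (l : List Int) (m : Nat) :
    (PySem.List.pyRange 0 ((m : Nat) : Int) 1).foldl
      (fun l' j =>
        if PySem.List.pyGetD l' j 0 > PySem.List.pyGetD l' (j + 1) 0 then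
          let a := PySem.List.pyGetD l' (j + 1) 0
          let b := PySem.List.pyGetD l' j 0
          PySem.List.pySetD (PySem.List.pySetD l' j a) (j + 1) b
        else l') l = innerN l m := by
  rw [PySem.List.pyRange_zero_nat, List.foldl_map]
  apply PySem.List.foldl_congr_mem
  intro acc j _
  have hc : ((j : Int) + 1) = ((j + 1 : Nat) : Int) := by push_cast; ring
  simp only [hc, PySem.List.pyGetD_natCast, PySem.List.pySetD_natCast]
  rfl

theorem manipulate_list_eq_outerN (lst : List Int) :
    manipulate_list lst = outerN (lst.map (fun x => 2 * x)) := by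
  unfold manipulate_list outerN
  set d := lst.map (fun x => 2 * x) with hd
  show (PySem.List.pyRange 0 (d.length : Int) 1).foldl _ d = _
  rw [PySem.List.pyRange_zero_nat, List.foldl_map]
  apply PySem.List.foldl_congr_mem
  intro acc i hi
  have hi' : i < d.length := List.mem_range.mp hi
  have hc : ((d.length : Int) - (i : Int) - 1) = ((d.length - i - 1 : Nat) : Int) := by
    push_cast [Nat.sub_sub]; omega
  rw [hc, inner_bridge]

-- ===== VERDICT (by name: the statement is the Claim_ definition above) =====
theorem manipulate_list_spec : Claim_equal_manipulate_list := by
  intro lst _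
  unfold Spec_manipulate_list manipulate_list_alt
  rw [manipulate_list_eq_outerN]
  exact (PySem.List.sorted_id_eq_of_perm_of_pairwise _ _ (perm_outerN _) (pairwise_outerN _)).symm
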